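-- pv_equiv track=rewrite | github.com/TheFiveBoxingWizardsJumpQuickly/CryptoBrella | app/cipher_docs/__init__.py | _make_paragraph_blocks
-- ===== SOURCE A (Python) =====
-- def _make_paragraph_blocks(lines):
--     blocks = []
--     paragraph_lines = []
--     index = 0
--
--     while index < len(lines):
--         stripped = lines[index].strip()
--
--         if not stripped:
--             if paragraph_lines:
--                 blocks.append(
--                     {"type": "paragraph", "text": " ".join(line.strip() for line in paragraph_lines)}
--                 )
--                 paragraph_lines = []
--             index += 1
--             continue
--
--         if stripped == "::pre":
--             if paragraph_lines:
--                 blocks.append(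
--                     {"type": "paragraph", "text": " ".join(line.strip() for line in paragraph_lines)}
--                 )
--                 paragraph_lines = []
--             index += 1
--             pre_lines = []
--             while index < len(lines) and lines[index].strip() != "::endpre":
--                 pre_lines.append(lines[index])
--                 index += 1
--             blocks.append({"type": "pre", "text": "\n".join(pre_lines).rstrip()})
--             if index < len(lines) and lines[index].strip() == "::endpre":
--                 index += 1
--             continue
--
--         paragraph_lines.append(lines[index])
--         index += 1
--
--     if paragraph_lines:
--         blocks.append({"type": "paragraph", "text": " ".join(line.strip() for line in paragraph_lines)})
--
--     return blocks
-- ===== SOURCE B (Python) =====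
-- def _make_paragraph_blocks(lines):
--     blocks = []
--     paragraph_lines = []
--     pre_lines = []
--     in_pre = False
--
--     def flush_paragraph():
--         nonlocal paragraph_lines
--         if paragraph_lines:
--             blocks.append({"type": "paragraph", "text": " ".join(l.strip() for l in paragraph_lines)})
--             paragraph_lines = []
--
--     for line in lines:
--         stripped = line.strip()
--         if in_pre:
--             if stripped == "::endpre":
--                 blocks.append({"type": "pre", "text": "\n".join(pre_lines).rstrip()})
--                 pre_lines = []
--                 in_pre = False
--             else:
--                 pre_lines.append(line)
--         elif not stripped:
--             flush_paragraph()
--         elif stripped == "::pre":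
--             flush_paragraph()
--             in_pre = True
--         else:
--             paragraph_lines.append(line)
--
--     flush_paragraph()
--     if in_pre:
--         blocks.append({"type": "pre", "text": "\n".join(pre_lines).rstrip()})
--     return blocks
-- ===== Notes on version B (the rewrite author's own statement) =====
-- stated objective: idiomatic
-- what changed: Replaces A's index-driven outer while with a nested inner while that consumes pre lines by a single flat for-loop over the lines maintaining an explicit in_pre flag, flushing any pending paragraph and pending pre block after the loop.
import Mathlib
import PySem

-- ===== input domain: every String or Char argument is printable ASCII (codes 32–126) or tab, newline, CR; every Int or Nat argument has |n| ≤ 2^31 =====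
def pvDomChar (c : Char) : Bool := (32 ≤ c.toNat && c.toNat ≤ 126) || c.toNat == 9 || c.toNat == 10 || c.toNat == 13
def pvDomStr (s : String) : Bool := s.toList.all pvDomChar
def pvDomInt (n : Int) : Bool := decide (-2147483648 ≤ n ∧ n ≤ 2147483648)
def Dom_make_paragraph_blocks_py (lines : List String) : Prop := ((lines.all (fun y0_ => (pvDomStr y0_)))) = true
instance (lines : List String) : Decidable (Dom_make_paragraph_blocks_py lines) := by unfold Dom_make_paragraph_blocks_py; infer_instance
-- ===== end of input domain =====

-- B replaces A's nested index-driven while loops by one flat pass with an in_pre flag (idiomatic decomposition, same cost).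

-- ===== PORT A =====
def aParagraphBlock (par : List String) : List (String × String) :=
  [("type", "paragraph"), ("text", PySem.Str.join " " (par.map PySem.Str.strip))]

def aPreBlock (pre : List String) : List (String × String) :=
  [("type", "pre"), ("text", PySem.Str.rstrip (PySem.Str.join "\n" pre))]

-- inner while of A: collect lines until one strips to "::endpre"; return (pre_lines, remaining lines starting at that line, or [])
def aTakePre : List String → List String × List String
  | [] => ([], [])
  | l :: rest =>
    if PySem.Str.strip l = "::endpre" then ([], l :: rest)
    else
      let pr := aTakePre rest
      (l :: pr.1, pr.2)

theorem aTakePre_len_le (ls : List String) : (aTakePre ls).2.length ≤ ls.length := by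
  induction ls with
  | nil => simp [aTakePre]
  | cons l rest ih =>
    simp only [aTakePre]
    split
    · simp
    · simpa using Nat.le_succ_of_le ih

-- outer while of A, as recursion on the remaining lines with the same state (blocks, paragraph_lines)
def aLoop : List String → List (List (String × String)) → List String → List (List (String × String))
  | [], blocks, par => if par ≠ [] then blocks ++ [aParagraphBlock par] else blocks
  | l :: rest, blocks, par =>
    let stripped := PySem.Str.strip l
    if stripped = "" then
      aLoop rest (if par ≠ [] then blocks ++ [aParagraphBlock par] else blocks) []
    else if stripped = "::pre" then
      let blocks1 := if par ≠ [] then blocks ++ [aParagraphBlock par] else blocks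
      let pr := aTakePre rest
      let blocks2 := blocks1 ++ [aPreBlock pr.1]
      if _h : pr.2 = [] then blocks2
      else aLoop pr.2.tail blocks2 []   -- the "::endpre" line is skipped
    else aLoop rest blocks (par ++ [l])
termination_by ls _ _ => ls.length
decreasing_by
  · simp
  · have hle := aTakePre_len_le rest
    have hpos : 0 < (aTakePre rest).2.length := List.length_pos_iff.mpr _h
    simp only [List.length_tail, List.length_cons]
    omega
  · simp

def make_paragraph_blocks_py (lines : List String) : List (List (String × String)) :=
  aLoop lines [] []

-- ===== PORT B =====
def bFlush (blocks : List (List (String × String))) (par : List String) : List (List (String × String)) :=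
  if par ≠ [] then blocks ++ [[("type", "paragraph"), ("text", PySem.Str.join " " (par.map PySem.Str.strip))]] else blocks

def bPreBlock (pre : List String) : List (String × String) :=
  [("type", "pre"), ("text", PySem.Str.rstrip (PySem.Str.join "\n" pre))]

-- state: (blocks, paragraph_lines, pre_lines, in_pre); one step of the flat for-loop
def bStep (st : List (List (String × String)) × List String × List String × Bool) (l : String) :
    List (List (String × String)) × List String × List String × Bool :=
  let (blocks, par, pre, inPre) := st
  let stripped := PySem.Str.strip l
  if inPre then
    if stripped = "::endpre" then (blocks ++ [bPreBlock pre], par, [], false)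
    else (blocks, par, pre ++ [l], true)
  else if stripped = "" then (bFlush blocks par, [], pre, false)
  else if stripped = "::pre" then (bFlush blocks par, [], pre, true)
  else (blocks, par ++ [l], pre, false)

-- after the loop: flush the pending paragraph, then a pending pre block if still inside one
def bFinish (st : List (List (String × String)) × List String × List String × Bool) :
    List (List (String × String)) :=
  let (blocks, par, pre, inPre) := st
  let blocks' := bFlush blocks par
  if inPre then blocks' ++ [bPreBlock pre] else blocks'

def make_paragraph_blocks_py_alt (lines : List String) : List (List (String × String)) :=
  bFinish (lines.foldl bStep ([], [], [], false))

-- ===== PRECONDITION & SPEC =====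
def Spec_make_paragraph_blocks_py (lines : List String) (out : List (List (String × String))) : Prop := out = make_paragraph_blocks_py_alt lines
instance (lines : List String) (out : List (List (String × String))) : Decidable (Spec_make_paragraph_blocks_py lines out) := by unfold Spec_make_paragraph_blocks_py; infer_instance

-- ===== CLAIM (what is proved, stated in full; the proofs are below) =====
def Claim_equal_make_paragraph_blocks_py : Prop := ∀ (lines : List String), Dom_make_paragraph_blocks_py lines → Spec_make_paragraph_blocks_py lines (make_paragraph_blocks_py lines)

-- ===== LEMMAS AND PROOFS =====
theorem bFlush_eq (blocks : List (List (String × String))) (par : List String) :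
    bFlush blocks par = if par ≠ [] then blocks ++ [aParagraphBlock par] else blocks := by
  simp [bFlush, aParagraphBlock]

-- B's fold while in_pre = true agrees with A's inner while (aTakePre) followed by the rest of the run
theorem foldl_pre (rest : List String) (b : List (List (String × String))) (par q : List String) :
    bFinish (rest.foldl bStep (b, par, q, true)) =
      let pr := aTakePre rest
      match pr.2 with
      | [] => bFlush b par ++ [bPreBlock (q ++ pr.1)]
      | _ :: rest' => bFinish (rest'.foldl bStep (b ++ [bPreBlock (q ++ pr.1)], par, [], false)) := by
  induction rest generalizing q with
  | nil => simp [aTakePre, bFinish, bFlush]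
  | cons l rest ih =>
    by_cases h : PySem.Str.strip l = "::endpre"
    · simp [aTakePre, h, bStep]
    · simp only [aTakePre, h, if_false, List.foldl_cons, bStep, if_true]
      rw [ih (q ++ [l])]
      simp

theorem main_lemma : ∀ (n : ℕ) (lines : List String) (blocks : List (List (String × String))) (par : List String),
    lines.length ≤ n →
    aLoop lines blocks par = bFinish (lines.foldl bStep (blocks, par, [], false)) := by
  intro n
  induction n with
  | zero =>
    intro lines blocks par h
    have : lines = [] := List.eq_nil_of_length_eq_zero (Nat.le_zero.mp h)
    subst this
    simp [aLoop, bFinish, bFlush_eq]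
  | succ n ih =>
    intro lines blocks par h
    match lines with
    | [] => simp [aLoop, bFinish, bFlush_eq]
    | l :: rest =>
      simp only [List.length_cons, Nat.succ_le_succ_iff] at h
      by_cases h0 : PySem.Str.strip l = ""
      · simp only [aLoop, h0, if_true, List.foldl_cons, bStep, Bool.false_eq_true, if_false]
        rw [ih rest _ [] h, bFlush_eq]
      · by_cases h1 : PySem.Str.strip l = "::pre"
        · simp only [aLoop, h1, List.foldl_cons, bStep, Bool.false_eq_true, if_false]
          simp only [String.reduceEq, if_false, if_true]
          rw [foldl_pre]
          simp only [List.nil_append]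
          have hlen := aTakePre_len_le rest
          cases hr : (aTakePre rest).2 with
          | nil =>
            simp [bFlush, aParagraphBlock, aPreBlock, bPreBlock]
          | cons x rest' =>
            rw [hr] at hlen
            simp only [List.length_cons] at hlen
            simp only [List.tail_cons]
            have hb : bFlush blocks par ++ [bPreBlock (aTakePre rest).1]
                = (if par ≠ [] then blocks ++ [aParagraphBlock par] else blocks) ++ [aPreBlock (aTakePre rest).1] := by
              simp [bFlush_eq, bPreBlock, aPreBlock]
            simp only [← hb]
            exact ih rest' _ [] (by omega)
        · simp only [aLoop, h0, h1, if_false, List.foldl_cons, bStep, Bool.false_eq_true]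
          exact ih rest _ _ h

-- ===== VERDICT (by name: the statement is the Claim_ definition above) =====
theorem make_paragraph_blocks_py_spec : Claim_equal_make_paragraph_blocks_py := by
  intro lines _
  unfold Spec_make_paragraph_blocks_py make_paragraph_blocks_py make_paragraph_blocks_py_alt
  exact main_lemma lines.length lines [] [] le_rfl
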